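-- pv_equiv track=rewrite | github.com/CMU15-112/lecture_demos_qatar | week9/mostVisits.py | mostVisits
-- ===== SOURCE A (Python) =====
-- def mostVisits(logbook):
--     freqD = {}
--     for day in logbook:
--         visits = set(logbook[day])
--         for student in visits:
--             freqD[student] = freqD.get(student, 0) + 1
--     res = set()
--     maxF = 0
--     for student in freqD:
--         if freqD[student] > maxF:
--             res = { student }
--             maxF = freqD[student]
--         elif freqD[student] == maxF:
--             res.add(student)
--     return res
-- ===== SOURCE B (Python) =====
-- def mostVisits(logbook):
--     # No frequency dictionary at all: collect the distinct students in first-appearance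
--     # order, then brute-force recount each student by scanning the days, and keep the
--     # students whose day-count equals the maximum.
--     dayLists = [logbook[day] for day in logbook]
--     daySets = [set(v) for v in dayLists]
--     students = []
--     seen = set()
--     for v in dayLists:
--         for s in v:
--             if s not in seen:
--                 seen.add(s)
--                 students.append(s)
--     def cnt(s):
--         return sum(1 for d in daySets if s in d)
--     maxF = max((cnt(s) for s in students), default=0)
--     return {s for s in students if cnt(s) == maxF}
-- ===== Notes on version B (the rewrite author's own statement) =====
-- stated objective: alternative
-- what changed: B drops A's frequency dictionary and its online running-max/result-set accumulator entirely: it collects the distinct students once, recounts each student by a direct scan over the days (a dictionary-free brute-force count), computes the maximum of those counts, and filters the students with that count.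
import Mathlib
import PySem

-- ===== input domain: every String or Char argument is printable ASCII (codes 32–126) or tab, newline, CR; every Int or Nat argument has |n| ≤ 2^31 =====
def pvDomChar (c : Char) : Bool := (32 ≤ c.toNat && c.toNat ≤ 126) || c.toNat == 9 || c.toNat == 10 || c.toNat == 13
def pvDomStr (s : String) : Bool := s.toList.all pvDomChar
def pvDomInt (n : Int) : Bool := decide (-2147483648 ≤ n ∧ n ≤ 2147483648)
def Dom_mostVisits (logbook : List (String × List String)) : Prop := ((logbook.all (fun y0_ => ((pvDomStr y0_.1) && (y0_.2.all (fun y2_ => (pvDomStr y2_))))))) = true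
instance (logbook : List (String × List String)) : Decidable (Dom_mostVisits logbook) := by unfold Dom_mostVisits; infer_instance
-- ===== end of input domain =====

-- B drops A's frequency dictionary and online running-max accumulator: it collects the distinct
-- students once, recounts each by a direct scan over the days, then filters at the maximum count.


-- ===== PORT A =====
-- the body of A's selection loop (the res/maxF accumulator)
def selStep (st : PySem.Set String × Int) (p : String × Int) : PySem.Set String × Int :=
  if p.2 > st.2 then (([p.1] : PySem.Set String), p.2)
  else if p.2 == st.2 then (PySem.Set.add st.1 p.1, st.2)
  else st

def mostVisits (logbook : List (String × List String)) : List String :=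
  -- freqD = {}; for day in logbook: for student in set(logbook[day]): freqD[student] = freqD.get(student, 0) + 1
  let freqD : PySem.Dict String Int :=
    (PySem.Dict.ofList logbook).items.foldl
      (fun freqD p =>
        List.foldl (fun d student => d.insert student (d.getD student 0 + 1)) freqD
          (PySem.Set.ofList p.2))
      PySem.Dict.empty
  -- res = set(); maxF = 0; for student in freqD: … (selStep); return res
  let r := freqD.items.foldl selStep ((PySem.Set.empty : PySem.Set String), (0 : Int))
  r.1

-- ===== PORT B =====
def mostVisits_alt (logbook : List (String × List String)) : List String :=
  let items := (PySem.Dict.ofList logbook).items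
  -- students = []; for day in logbook: for s in logbook[day]: if s not in students: students.append(s)
  let students : PySem.Set String :=
    items.foldl (fun acc p => p.2.foldl PySem.Set.add acc) PySem.Set.empty
  -- cnt(s) = sum(1 for day in logbook if s in logbook[day])
  let cnt : String → Int := fun s => (items.countP (fun p => decide (s ∈ p.2)) : Int)
  -- maxF = max((cnt(s) for s in students), default=0)
  let maxF := PySem.List.maxD (students.map cnt) (fun v => v) 0
  -- {s for s in students if cnt(s) == maxF}
  PySem.Set.ofList (students.filter (fun s => cnt s == maxF))

-- ===== PRECONDITION & SPEC =====
def Spec_mostVisits (logbook : List (String × List String)) (out : List String) : Prop := out = mostVisits_alt logbook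
instance (logbook : List (String × List String)) (out : List String) : Decidable (Spec_mostVisits logbook out) := by unfold Spec_mostVisits; infer_instance

-- ===== CLAIM (what is proved, stated in full; the proofs are below) =====
def Claim_equal_mostVisits : Prop := ∀ (logbook : List (String × List String)), Dom_mostVisits logbook → Spec_mostVisits logbook (mostVisits logbook)

-- ===== LEMMAS AND PROOFS =====

lemma mem_foldl_add {α : Type} [DecidableEq α] (l : List α) (acc : PySem.Set α) (x : α)
    (hx : x ∈ acc) : x ∈ l.foldl PySem.Set.add acc := by
  induction l generalizing acc with
  | nil => simpa using hx
  | cons y t ih =>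
    simp only [List.foldl_cons]
    exact ih _ ((PySem.Set.mem_add acc y x).mpr (Or.inl hx))

lemma mem_foldl_add_of_mem {α : Type} [DecidableEq α] (l : List α) (x : α) :
    ∀ acc : PySem.Set α, x ∈ l → x ∈ l.foldl PySem.Set.add acc := by
  induction l with
  | nil => intro acc hx; cases hx
  | cons y t ih =>
    intro acc hx
    simp only [List.foldl_cons]
    rcases List.mem_cons.mp hx with h | h
    · exact mem_foldl_add t _ x ((PySem.Set.mem_add acc y x).mpr (Or.inr h))
    · exact ih _ h

-- folding Set.add over the deduplicated list gives the same set as folding over the raw list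
lemma foldl_add_ofList {α : Type} [DecidableEq α] (l : List α) (acc : PySem.Set α) :
    (PySem.Set.ofList l : List α).foldl PySem.Set.add acc = l.foldl PySem.Set.add acc := by
  have G : ∀ (l : List α) (acc s : PySem.Set α),
      (l.foldl PySem.Set.add s).foldl PySem.Set.add acc
        = l.foldl PySem.Set.add (s.foldl PySem.Set.add acc) := by
    intro l
    induction l with
    | nil => intro acc s; rfl
    | cons x t ih =>
      intro acc s
      simp only [List.foldl_cons]
      rw [ih]
      congr 1
      by_cases hx : x ∈ s
      · have h1 : PySem.Set.add s x = s := by simp [PySem.Set.add, PySem.Set.contains, hx]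
        have h2 : x ∈ s.foldl PySem.Set.add acc := mem_foldl_add_of_mem s x acc hx
        rw [h1]
        simp [PySem.Set.add, PySem.Set.contains, h2]
      · have h1 : PySem.Set.add s x = s ++ [x] := by
          simp [PySem.Set.add, PySem.Set.contains, hx]
        rw [h1, List.foldl_append]
        rfl
  have := G l acc []
  rw [PySem.Set.ofList_eq_foldl]
  simpa using this

-- deduplicating each chunk before folding Set.add changes nothing
lemma foldl_add_flatMap_dedup {α β : Type} [DecidableEq α] (l : List β) (f : β → List α)
    (acc : PySem.Set α) :
    (l.flatMap (fun p => (PySem.Set.ofList (f p) : List α))).foldl PySem.Set.add acc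
      = (l.flatMap f).foldl PySem.Set.add acc := by
  induction l generalizing acc with
  | nil => rfl
  | cons p t ih =>
    simp only [List.flatMap_cons, List.foldl_append]
    rw [foldl_add_ofList, ih]

-- counting an element of a flatMap of deduplicated chunks = counting the chunks containing it
lemma count_flatMap_dedup {α β : Type} [DecidableEq α] (l : List β) (f : β → List α) (x : α) :
    (l.flatMap (fun p => (PySem.Set.ofList (f p) : List α))).count x
      = l.countP (fun p => decide (x ∈ f p)) := by
  induction l with
  | nil => rfl
  | cons p t ih =>
    simp only [List.flatMap_cons, List.count_append, List.countP_cons, ih]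
    have hnd := PySem.Set.nodup_ofList (f p)
    by_cases hx : x ∈ f p
    · have hmem : x ∈ (PySem.Set.ofList (f p) : List α) := (PySem.Set.mem_ofList (f p) x).mpr hx
      have h1 : (PySem.Set.ofList (f p) : List α).count x = 1 :=
        List.count_eq_one_of_mem hnd hmem
      simp [hx]
      omega
    · have hmem : x ∉ (PySem.Set.ofList (f p) : List α) := fun h =>
        hx ((PySem.Set.mem_ofList (f p) x).mp h)
      simp [List.count_eq_zero_of_not_mem hmem, hx]

-- A's selection loop, run after an already-processed prefix `pre` whose values are ≤ m,
-- returns exactly the keys of maximal value together with that maximum (a running fold of max).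
lemma sel_inv (l : List (String × Int)) :
    ∀ (pre : List (String × Int)) (m : Int),
      ((pre ++ l).map Prod.fst).Nodup →
      (∀ p ∈ l, 1 ≤ p.2) →
      (∀ p ∈ pre, p.2 ≤ m) →
      l.foldl selStep (((pre.filter (fun p => p.2 == m)).map Prod.fst : PySem.Set String), m)
        = (((pre ++ l).filter (fun p => p.2 == l.foldl (fun a p => max a p.2) m)).map Prod.fst,
           l.foldl (fun a p => max a p.2) m) := by
  induction l with
  | nil => intro pre m _ _ _; simp
  | cons q t ih =>
    intro pre m hnd hpos hle
    obtain ⟨s, f⟩ := q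
    have hf1 : (1 : Int) ≤ f := by simpa using hpos (s, f) (by simp)
    by_cases hgt : f > m
    · have hstep : selStep (((pre.filter (fun p => p.2 == m)).map Prod.fst : PySem.Set String), m) (s, f)
          = (((pre ++ [(s, f)]).filter (fun p => p.2 == f)).map Prod.fst, f) := by
        have hfil : pre.filter (fun p => p.2 == f) = [] := by
          rw [List.filter_eq_nil_iff]; intro p hp
          have := hle p hp; simp only [beq_iff_eq]; omega
        simp [selStep, hgt, List.filter_append, hfil]
      have h2 := ih (pre ++ [(s, f)]) f (by simpa using hnd)
        (fun p hp => hpos p (List.mem_cons_of_mem _ hp))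
        (by
          intro p hp
          rcases List.mem_append.mp hp with h | h
          · exact le_of_lt (lt_of_le_of_lt (hle p h) hgt)
          · have : p = (s, f) := by simpa using h
            subst this; exact le_refl _)
      simp only [List.append_assoc, List.singleton_append] at h2
      have hmax : max m f = f := by omega
      simp only [List.foldl_cons, hmax]
      rw [hstep, h2]
    · by_cases heq : f = m
      · have hsnot : s ∉ (pre.filter (fun p => p.2 == m)).map Prod.fst := by
          intro hmem
          have hs : s ∈ pre.map Prod.fst := by
            rcases List.mem_map.mp hmem with ⟨p, hp, hps⟩
            exact List.mem_map.mpr ⟨p, (List.mem_filter.mp hp).1, hps⟩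
          have := hnd
          simp only [List.map_append, List.nodup_append] at this
          exact this.2.2 s hs s (List.mem_map.mpr ⟨(s, f), by simp, rfl⟩) rfl
        have hstep : selStep (((pre.filter (fun p => p.2 == m)).map Prod.fst : PySem.Set String), m) (s, f)
            = (((pre ++ [(s, f)]).filter (fun p => p.2 == m)).map Prod.fst, m) := by
          simp only [selStep, heq, beq_self_eq_true, if_pos, lt_irrefl]
          rw [PySem.Set.add_of_not_mem hsnot]
          simp [List.filter_append]
        have h2 := ih (pre ++ [(s, f)]) m (by simpa using hnd)
          (fun p hp => hpos p (List.mem_cons_of_mem _ hp))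
          (by
            intro p hp
            rcases List.mem_append.mp hp with h | h
            · exact hle p h
            · have : p = (s, f) := by simpa using h
              subst this; simp [heq])
        simp only [List.append_assoc, List.singleton_append] at h2
        have hmax : max m f = m := by omega
        simp only [List.foldl_cons, hmax]
        rw [hstep, h2]
      · have hne : (f == m) = false := by simp [heq]
        have hstep : selStep (((pre.filter (fun p => p.2 == m)).map Prod.fst : PySem.Set String), m) (s, f)
            = (((pre ++ [(s, f)]).filter (fun p => p.2 == m)).map Prod.fst, m) := by
          simp [selStep, hgt, hne, List.filter_append]
        have h2 := ih (pre ++ [(s, f)]) m (by simpa using hnd)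
          (fun p hp => hpos p (List.mem_cons_of_mem _ hp))
          (by
            intro p hp
            rcases List.mem_append.mp hp with h | h
            · exact hle p h
            · have : p = (s, f) := by simpa using h
              subst this; simp; omega)
        simp only [List.append_assoc, List.singleton_append] at h2
        have hmax : max m f = m := by omega
        simp only [List.foldl_cons, hmax]
        rw [hstep, h2]

-- max(values, default=0) equals the running max from 0 when every value is ≥ 1
lemma maxD_eq_foldl (vals : List Int) (hpos : ∀ v ∈ vals, 1 ≤ v) :
    PySem.List.maxD vals (fun v => v) 0 = vals.foldl max 0 := by
  cases vals with
  | nil => rfl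
  | cons x t =>
    have hx : max 0 x = x := by
      have := hpos x (by simp)
      omega
    simp [PySem.List.maxD, PySem.List.max?_id_cons, hx]

theorem mostVisits_eq_alt (logbook : List (String × List String)) :
    mostVisits logbook = mostVisits_alt logbook := by
  unfold mostVisits mostVisits_alt
  simp only []
  set items := (PySem.Dict.ofList logbook).items with hitems0
  set xs := items.flatMap (fun p => (PySem.Set.ofList p.2 : List String)) with hxs
  -- A's frequency dict is the counter of the set-flattened appearance list
  have hfold :
      items.foldl
        (fun freqD p =>
          List.foldl (fun d student => d.insert student (d.getD student 0 + 1)) freqD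
            (PySem.Set.ofList p.2))
        (PySem.Dict.empty : PySem.Dict String Int)
      = xs.foldl (fun d s => d.insert s (d.getD s 0 + 1)) PySem.Dict.empty := by
    rw [hxs, List.foldl_flatMap]
  have hctr : xs.foldl (fun d s => d.insert s (d.getD s 0 + 1)) PySem.Dict.empty
      = PySem.Dict.counter xs := PySem.Dict.foldl_insert_getD_add_one_eq_counter xs
  simp only [hfold, hctr]
  set d := PySem.Dict.counter xs with hd
  have hitems : d.items = (PySem.Set.ofList xs).map (fun k => (k, (xs.count k : Int))) :=
    PySem.Dict.items_counter xs
  have hnd : (d.items.map Prod.fst).Nodup := by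
    rw [hitems, List.map_map]
    have hid : (Prod.fst ∘ fun k : String => (k, (xs.count k : Int))) = id := rfl
    rw [hid, List.map_id]
    exact PySem.Set.nodup_ofList xs
  have hpos : ∀ p ∈ d.items, 1 ≤ p.2 := by
    intro p hp
    rw [hitems] at hp
    rcases List.mem_map.mp hp with ⟨k, hk, rfl⟩
    have hkxs : k ∈ xs := (PySem.Set.mem_ofList xs k).mp hk
    have : 0 < xs.count k := List.count_pos_iff.mpr hkxs
    show (1 : Int) ≤ (xs.count k : Int)
    exact_mod_cast this
  -- A's selection loop via the invariant (empty prefix)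
  have hsel := sel_inv d.items [] 0 (by simpa using hnd) hpos (by simp)
  simp only [List.filter_nil, List.map_nil, List.nil_append] at hsel
  have hemp : ((PySem.Set.empty : PySem.Set String), (0 : Int)) = (([] : List String), (0 : Int)) := rfl
  rw [hemp, hsel]
  -- B's students list is the deduplication of xs
  have hstud : items.foldl (fun acc p => p.2.foldl PySem.Set.add acc) PySem.Set.empty
      = (PySem.Set.ofList xs : List String) := by
    calc items.foldl (fun acc p => p.2.foldl PySem.Set.add acc) PySem.Set.empty
        = (items.flatMap (fun p => p.2)).foldl PySem.Set.add PySem.Set.empty :=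
          (List.foldl_flatMap).symm
      _ = xs.foldl PySem.Set.add PySem.Set.empty := by
          rw [hxs]
          exact (foldl_add_flatMap_dedup items (fun p => p.2) PySem.Set.empty).symm
      _ = (PySem.Set.ofList xs : List String) := (PySem.Set.ofList_eq_foldl xs).symm
  -- B's cnt equals counting in xs
  have hcnt : ∀ s, ((items.countP (fun p => decide (s ∈ p.2)) : Nat) : Int)
      = ((xs.count s : Nat) : Int) := by
    intro s
    rw [hxs, count_flatMap_dedup items (fun p => p.2) s]
  rw [hstud]
  simp only [hcnt]
  -- now both sides are over (Set.ofList xs) with the count function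
  set M := d.items.foldl (fun a p => max a p.2) 0 with hM
  -- B's maxF equals M
  have hmap : (PySem.Set.ofList xs : List String).map (fun s => ((xs.count s : Nat) : Int))
      = d.items.map Prod.snd := by
    rw [hitems, List.map_map]
    rfl
  have hposv : ∀ v ∈ d.items.map Prod.snd, 1 ≤ v := by
    intro v hv
    rcases List.mem_map.mp hv with ⟨p, hp, rfl⟩
    exact hpos p hp
  have hmx : PySem.List.maxD ((PySem.Set.ofList xs : List String).map
        (fun s => ((xs.count s : Nat) : Int))) (fun v => v) 0 = M := by
    rw [hmap, maxD_eq_foldl _ hposv, hM, List.foldl_map]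
  rw [hmx]
  -- the filters agree
  have hfilt : (d.items.filter (fun p => p.2 == M)).map Prod.fst
      = (PySem.Set.ofList xs : List String).filter (fun s => ((xs.count s : Nat) : Int) == M) := by
    rw [hitems, List.filter_map, List.map_map]
    have hid : (Prod.fst ∘ fun k : String => (k, (xs.count k : Int))) = id := rfl
    rw [hid, List.map_id]
    rfl
  rw [hfilt]
  -- B's final set-of is the identity on the nodup filtered list
  have hndf : ((PySem.Set.ofList xs : List String).filter
      (fun s => ((xs.count s : Nat) : Int) == M)).Nodup :=
    (PySem.Set.nodup_ofList xs).filter _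
  rw [PySem.Set.ofList_eq_self_of_nodup _ hndf]

-- ===== VERDICT (by name: the statement is the Claim_ definition above) =====
theorem mostVisits_spec : Claim_equal_mostVisits := by
  intro logbook _
  exact mostVisits_eq_alt logbook
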